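-- pv_equiv track=rewrite | github.com/FedeSchmidt/Argument-Extraction-using-STS | nbs/categorization.py | get_number_predicted_arguments_per_category
-- ===== SOURCE A (Python) =====
-- def get_number_predicted_arguments_per_category(categorization):
--     number_match = 0
--     number_partial_match = 0
--     number_made_ups = 0
--
--     for (y, z) in categorization:
--         if len(z) == 0:
--             number_made_ups += 1
--         elif len(z) == 1:
--             if z[0] == 1:
--                 number_match += 1
--             else:
--                 number_partial_match += 1
--         elif len(z) > 1:
--             number_partial_match += 1
--
--     return number_match, number_partial_match, number_made_ups
-- ===== SOURCE B (Python) =====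
-- def get_number_predicted_arguments_per_category(categorization):
--     pairs = list(categorization)
--     number_made_ups = sum(1 for _, z in pairs if len(z) == 0)
--     number_match = sum(1 for _, z in pairs if len(z) == 1 and z[0] == 1)
--     number_partial_match = len(pairs) - number_match - number_made_ups
--     return number_match, number_partial_match, number_made_ups
-- ===== Notes on version B (the rewrite author's own statement) =====
-- stated objective: simpler
-- what changed: Replaces the explicit if/elif chain with three running counters by two targeted count aggregations (empty-z and exact-match pairs), deriving the partial-match bucket by subtraction from the total length.
import Mathlib
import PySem

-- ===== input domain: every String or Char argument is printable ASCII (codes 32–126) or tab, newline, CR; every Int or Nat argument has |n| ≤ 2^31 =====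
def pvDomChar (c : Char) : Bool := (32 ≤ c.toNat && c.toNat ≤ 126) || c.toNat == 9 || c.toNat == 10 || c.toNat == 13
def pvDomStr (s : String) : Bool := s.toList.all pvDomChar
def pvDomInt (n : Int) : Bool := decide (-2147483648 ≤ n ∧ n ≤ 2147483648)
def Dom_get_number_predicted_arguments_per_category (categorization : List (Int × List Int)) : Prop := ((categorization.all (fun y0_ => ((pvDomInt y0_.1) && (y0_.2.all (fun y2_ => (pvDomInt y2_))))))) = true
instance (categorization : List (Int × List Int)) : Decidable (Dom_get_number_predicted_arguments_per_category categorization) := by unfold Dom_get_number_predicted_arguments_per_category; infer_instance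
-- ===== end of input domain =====

-- B replaces A's if/elif chain over three counters with two count aggregations and
-- derives the partial-match bucket by subtraction (objective: simpler).

-- ===== PORT A =====
-- literal port of A's loop body (the if/elif chain over the three counters)
def pvStepA (st : Int × Int × Int) (yz : Int × List Int) : Int × Int × Int :=
  let z := yz.2
  if z.length = 0 then (st.1, st.2.1, st.2.2 + 1)
  else if z.length = 1 then
    (if PySem.List.pyGet? z 0 = some 1 then (st.1 + 1, st.2.1, st.2.2)
     else (st.1, st.2.1 + 1, st.2.2))
  else if z.length > 1 then (st.1, st.2.1 + 1, st.2.2)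
  else st

-- literal port of A: fold the chain over the list starting from (0, 0, 0)
def get_number_predicted_arguments_per_category (categorization : List (Int × List Int)) : Int × Int × Int :=
  let st := categorization.foldl pvStepA (0, 0, 0)
  (st.1, st.2.1, st.2.2)

-- ===== PORT B =====
-- port of Source B: two countP aggregations, third bucket by subtraction
def get_number_predicted_arguments_per_category_alt (categorization : List (Int × List Int)) : Int × Int × Int :=
  let number_made_ups : Int := categorization.countP (fun yz => yz.2.length = 0)
  let number_match : Int := categorization.countP
    (fun yz => yz.2.length = 1 && PySem.List.pyGet? yz.2 0 = some 1)
  let number_partial_match : Int := (categorization.length : Int) - number_match - number_made_ups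
  (number_match, number_partial_match, number_made_ups)

-- ===== PRECONDITION & SPEC =====
def Spec_get_number_predicted_arguments_per_category (categorization : List (Int × List Int)) (out : Int × Int × Int) : Prop := out = get_number_predicted_arguments_per_category_alt categorization
instance (categorization : List (Int × List Int)) (out : Int × Int × Int) : Decidable (Spec_get_number_predicted_arguments_per_category categorization out) := by unfold Spec_get_number_predicted_arguments_per_category; infer_instance

-- ===== CLAIM (what is proved, stated in full; the proofs are below) =====
def Claim_equal_get_number_predicted_arguments_per_category : Prop := ∀ (categorization : List (Int × List Int)), Dom_get_number_predicted_arguments_per_category categorization → Spec_get_number_predicted_arguments_per_category categorization (get_number_predicted_arguments_per_category categorization)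

-- ===== LEMMAS AND PROOFS =====

theorem pv_fold_inv (cs : List (Int × List Int)) :
    ∀ (m p u : Int),
      cs.foldl pvStepA (m, p, u)
      = (m + (cs.countP (fun yz => yz.2.length = 1 && PySem.List.pyGet? yz.2 0 = some 1) : Int),
         p + ((cs.length : Int)
              - (cs.countP (fun yz => yz.2.length = 1 && PySem.List.pyGet? yz.2 0 = some 1) : Int)
              - (cs.countP (fun yz => yz.2.length = 0) : Int)),
         u + (cs.countP (fun yz => yz.2.length = 0) : Int)) := by
  induction cs with
  | nil => intro m p u; simp
  | cons hd tl ih =>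
    intro m p u
    rw [List.foldl_cons]
    by_cases h0 : hd.2.length = 0
    · rw [show pvStepA (m, p, u) hd = (m, p, u + 1) from by simp [pvStepA, h0], ih]
      simp only [List.countP_cons, List.length_cons, Prod.mk.injEq]
      simp only [h0]
      refine ⟨?_, ?_, ?_⟩ <;> simp <;> push_cast <;> omega
    · by_cases h1 : hd.2.length = 1
      · by_cases hg : PySem.List.pyGet? hd.2 0 = some 1
        · rw [show pvStepA (m, p, u) hd = (m + 1, p, u) from by
              simp only [pvStepA]; rw [if_neg h0, if_pos h1, if_pos hg], ih]
          simp only [List.countP_cons, List.length_cons, Prod.mk.injEq]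
          simp only [h0, h1, hg]
          refine ⟨?_, ?_, ?_⟩ <;> simp <;> push_cast <;> omega
        · rw [show pvStepA (m, p, u) hd = (m, p + 1, u) from by
              simp only [pvStepA]; rw [if_neg h0, if_pos h1, if_neg hg], ih]
          simp only [List.countP_cons, List.length_cons, Prod.mk.injEq]
          simp only [h0, h1, hg]
          refine ⟨?_, ?_, ?_⟩ <;> simp <;> push_cast <;> omega
      · have hgt : hd.2.length > 1 := by omega
        rw [show pvStepA (m, p, u) hd = (m, p + 1, u) from by
              simp only [pvStepA]; rw [if_neg h0, if_neg h1, if_pos hgt], ih]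
        simp only [List.countP_cons, List.length_cons, Prod.mk.injEq]
        simp only [h0, h1]
        refine ⟨?_, ?_, ?_⟩ <;> simp <;> push_cast <;> omega

-- ===== VERDICT (by name: the statement is the Claim_ definition above) =====
theorem get_number_predicted_arguments_per_category_spec : Claim_equal_get_number_predicted_arguments_per_category := by
  intro cs _
  show _ = _
  unfold get_number_predicted_arguments_per_category get_number_predicted_arguments_per_category_alt
  simp only [pv_fold_inv]
  simp
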